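-- pv_equiv track=rewrite | github.com/AlexSnider/Projetinhos | Python/Dione/D2.py | filtrar
-- ===== SOURCE A (Python) =====
-- def filtrar(x, m, n):
--     par = []
--     impar = []
--
--     for i in range(m):
--         for j in range(n):
--             if x[i][j] % 2 == 0:
--                 par.append(x[i][j])
--             else:
--                 impar.append(x[i][j])
--     separate = par + impar
--     return separate
-- ===== SOURCE B (Python) =====
-- def filtrar(x, m, n):
--     flat = [x[i][j] for i in range(m) for j in range(n)]
--     return sorted(flat, key=lambda v: v % 2)
-- ===== Notes on version B (the rewrite author's own statement) =====
-- stated objective: idiomatic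
-- what changed: Replaces the explicit two-bucket partition loop with building the flat element list once and a single stable sort keyed on v % 2, so evens precede odds with original order preserved.
import Mathlib
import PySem

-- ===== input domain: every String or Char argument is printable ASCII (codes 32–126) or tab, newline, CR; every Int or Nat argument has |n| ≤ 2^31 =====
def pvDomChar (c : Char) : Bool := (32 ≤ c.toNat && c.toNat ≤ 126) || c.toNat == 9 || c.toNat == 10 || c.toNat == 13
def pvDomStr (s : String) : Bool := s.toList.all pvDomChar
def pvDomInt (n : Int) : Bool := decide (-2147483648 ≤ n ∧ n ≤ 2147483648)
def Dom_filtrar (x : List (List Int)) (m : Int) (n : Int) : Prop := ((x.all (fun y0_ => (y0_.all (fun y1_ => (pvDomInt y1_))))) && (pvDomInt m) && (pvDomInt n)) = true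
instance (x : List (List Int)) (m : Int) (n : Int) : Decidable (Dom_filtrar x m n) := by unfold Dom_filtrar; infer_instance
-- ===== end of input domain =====

-- B replaces A's explicit two-bucket partition loop with one flat pass plus a stable sort keyed on v % 2 (idiomatic rewrite, same result).


-- ===== PORT A =====
-- for i in range(m): for j in range(n): append x[i][j] to par/impar; return par + impar
-- (indexing via pyGetD; Pre_filtrar guarantees every accessed index is in range, where pyGetD is exact)
def filtrar (x : List (List Int)) (m : Int) (n : Int) : List Int :=
  let st :=
    (PySem.List.pyRange 0 m 1).foldl (fun (s : List Int × List Int) i =>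
      (PySem.List.pyRange 0 n 1).foldl (fun (s : List Int × List Int) j =>
        let v := PySem.List.pyGetD (PySem.List.pyGetD x i []) j 0
        if PySem.Int.mod v 2 = 0 then (s.1 ++ [v], s.2) else (s.1, s.2 ++ [v])) s)
      ([], [])
  st.1 ++ st.2

-- ===== PORT B =====
-- flat = [x[i][j] for i in range(m) for j in range(n)]; return sorted(flat, key=lambda v: v % 2)
def filtrar_alt (x : List (List Int)) (m : Int) (n : Int) : List Int :=
  let flat :=
    (PySem.List.pyRange 0 m 1).flatMap (fun i =>
      (PySem.List.pyRange 0 n 1).map (fun j =>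
        PySem.List.pyGetD (PySem.List.pyGetD x i []) j 0))
  PySem.List.sorted flat (fun v => PySem.Int.mod v 2)

-- ===== PRECONDITION & SPEC =====
-- Pre_: every accessed cell exists — if the inner loop runs (0 < n), the first m rows exist and each has length ≥ n; elsewhere A raises IndexError.
def Pre_filtrar (x : List (List Int)) (m : Int) (n : Int) : Prop :=
  0 < n → m ≤ (x.length : Int) ∧ ∀ r ∈ x.take m.toNat, n ≤ (r.length : Int)
instance (x : List (List Int)) (m : Int) (n : Int) : Decidable (Pre_filtrar x m n) := by unfold Pre_filtrar; infer_instance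
def pvWitness_filtrar : List (List Int) × Int × Int := ([[1, 2], [3, 4]], 2, 2)

def Spec_filtrar (x : List (List Int)) (m : Int) (n : Int) (out : List Int) : Prop := out = filtrar_alt x m n
instance (x : List (List Int)) (m : Int) (n : Int) (out : List Int) : Decidable (Spec_filtrar x m n out) := by unfold Spec_filtrar; infer_instance

-- ===== CLAIM (what is proved, stated in full; the proofs are below) =====
def Claim_equal_filtrar : Prop := ∀ (x : List (List Int)) (m : Int) (n : Int), Dom_filtrar x m n → Pre_filtrar x m n → Spec_filtrar x m n (filtrar x m n)

-- ===== LEMMAS AND PROOFS =====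

-- A's partition step over an arbitrary flat list of values (stated with % = emod; mod v 2 = v % 2).
theorem pv_partition_foldl (l : List Int) (p q : List Int) :
    l.foldl (fun (s : List Int × List Int) v =>
        if v % 2 = 0 then (s.1 ++ [v], s.2) else (s.1, s.2 ++ [v])) (p, q)
      = (p ++ l.filter (fun v => decide (v % 2 = 0)),
         q ++ l.filter (fun v => !decide (v % 2 = 0))) := by
  induction l generalizing p q with
  | nil => simp
  | cons a t ih =>
    simp only [List.foldl_cons, List.filter_cons]
    by_cases h : a % 2 = 0 <;>
      simp only [if_pos, h, decide_true, decide_false, Bool.not_true, Bool.not_false,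
        if_false, ih, List.append_assoc, List.singleton_append, Bool.false_eq_true]

-- inserting an even value into (evens ++ odds) puts it at the end of the evens
theorem pv_insertBy_even (x : Int) (hx : x % 2 = 0) (E O : List Int)
    (hE : ∀ e ∈ E, e % 2 = 0) (hO : ∀ o ∈ O, o % 2 = 1) :
    PySem.List.insertBy (fun a b => decide (a % 2 < b % 2)) x (E ++ O)
      = (E ++ [x]) ++ O := by
  induction E with
  | nil =>
    cases O with
    | nil => simp [PySem.List.insertBy]
    | cons o t =>
      have := hO o (by simp)
      simp [PySem.List.insertBy, hx, this]
  | cons e t ih =>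
    have he := hE e (by simp)
    simp only [List.cons_append, PySem.List.insertBy, hx, he, lt_self_iff_false, decide_false,
      Bool.false_eq_true, if_false]
    have := ih (fun e h => hE e (by simp [h]))
    simp [this]

-- inserting an odd value into (evens ++ odds) puts it at the very end
theorem pv_insertBy_odd (x : Int) (hx : x % 2 = 1) (E O : List Int)
    (hE : ∀ e ∈ E, e % 2 = 0) (hO : ∀ o ∈ O, o % 2 = 1) :
    PySem.List.insertBy (fun a b => decide (a % 2 < b % 2)) x (E ++ O)
      = E ++ (O ++ [x]) := by
  have hall : ∀ y ∈ E ++ O, (fun a b => decide (a % 2 < b % 2)) x y = false := by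
    intro y hy
    rcases List.mem_append.mp hy with h | h
    · have := hE y h; simp only [decide_eq_false_iff_not]; omega
    · have := hO y h; simp only [decide_eq_false_iff_not]; omega
  have := PySem.List.insertBy_of_forall_not_before (fun a b => decide (a % 2 < b % 2)) x (E ++ O) hall
  simpa using this

-- stable sort on the 0/1 key v % 2 is exactly "evens then odds"
theorem pv_sorted_mod2 (l : List Int) :
    PySem.List.sorted l (fun v => v % 2)
      = l.filter (fun v => decide (v % 2 = 0))
        ++ l.filter (fun v => !decide (v % 2 = 0)) := by
  rw [PySem.List.sorted_eq_foldl_insertBy]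
  suffices h : ∀ (E O : List Int), (∀ e ∈ E, e % 2 = 0) → (∀ o ∈ O, o % 2 = 1) →
      l.foldl (fun acc v => PySem.List.insertBy (fun a b => decide (a % 2 < b % 2)) v acc) (E ++ O)
        = (E ++ l.filter (fun v => decide (v % 2 = 0)))
          ++ (O ++ l.filter (fun v => !decide (v % 2 = 0))) by
    simpa using h [] [] (by simp) (by simp)
  induction l with
  | nil => intro E O _ _; simp
  | cons a t ih =>
    intro E O hE hO
    rcases Int.emod_two_eq_zero_or_one a with h | h
    · have step := pv_insertBy_even a h E O hE hO
      simp only [List.foldl_cons, step]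
      have hrec := ih (E ++ [a]) O
        (by intro e he; rcases List.mem_append.mp he with h' | h'
            · exact hE e h'
            · simp at h'; simpa [h'] using h) hO
      simp only [List.append_assoc, List.singleton_append] at hrec ⊢
      simp only [hrec, List.filter_cons, h, decide_true, Bool.not_true, Bool.false_eq_true,
        if_false, if_true, List.cons_append]
    · have step := pv_insertBy_odd a h E O hE hO
      simp only [List.foldl_cons, step]
      have hrec := ih E (O ++ [a]) hE
        (by intro o ho; rcases List.mem_append.mp ho with h' | h'
            · exact hO o h'
            · simp at h'; simpa [h'] using h)
      have h0 : ¬ a % 2 = 0 := by omega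
      simp only [List.append_assoc, List.singleton_append] at hrec ⊢
      simp only [hrec, List.filter_cons, h0, decide_false, Bool.not_false, Bool.false_eq_true,
        if_false, if_true]

-- ===== VERDICT (by name: the statement is the Claim_ definition above) =====
theorem filtrar_spec : Claim_equal_filtrar := by
  intro x m n _ _
  unfold Spec_filtrar filtrar filtrar_alt
  have h2 : (0:Int) < 2 := by norm_num
  simp only [PySem.Int.mod_eq_emod_of_pos h2]
  rw [pv_sorted_mod2]
  have key : ∀ (rows : List Int) (p q : List Int),
      rows.foldl (fun (s : List Int × List Int) i =>
        (PySem.List.pyRange 0 n 1).foldl (fun (s : List Int × List Int) j =>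
          let v := PySem.List.pyGetD (PySem.List.pyGetD x i []) j 0
          if v % 2 = 0 then (s.1 ++ [v], s.2) else (s.1, s.2 ++ [v])) s) (p, q)
      = (p ++ (rows.flatMap (fun i => (PySem.List.pyRange 0 n 1).map
              (fun j => PySem.List.pyGetD (PySem.List.pyGetD x i []) j 0))).filter
              (fun v => decide (v % 2 = 0)),
         q ++ (rows.flatMap (fun i => (PySem.List.pyRange 0 n 1).map
              (fun j => PySem.List.pyGetD (PySem.List.pyGetD x i []) j 0))).filter
              (fun v => !decide (v % 2 = 0))) := by
    intro rows
    induction rows with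
    | nil => intro p q; simp
    | cons i t ih =>
      intro p q
      have hinner : ∀ s : List Int × List Int,
          (PySem.List.pyRange 0 n 1).foldl (fun (s : List Int × List Int) j =>
            let v := PySem.List.pyGetD (PySem.List.pyGetD x i []) j 0
            if v % 2 = 0 then (s.1 ++ [v], s.2) else (s.1, s.2 ++ [v])) s
          = ((PySem.List.pyRange 0 n 1).map
              (fun j => PySem.List.pyGetD (PySem.List.pyGetD x i []) j 0)).foldl
              (fun (s : List Int × List Int) v =>
                if v % 2 = 0 then (s.1 ++ [v], s.2) else (s.1, s.2 ++ [v])) s := by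
        intro s; rw [List.foldl_map]
      simp only [List.foldl_cons, hinner, pv_partition_foldl, ih, List.flatMap_cons,
        List.filter_append, List.append_assoc]
  have hk := key (PySem.List.pyRange 0 m 1) [] []
  simp only [List.nil_append] at hk
  rw [hk]
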